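-- pv_equiv track=rewrite | github.com/csundara/CSE107 | lab5/luhns.py | double_dig
-- ===== SOURCE A (Python) =====
-- def double_dig(lst):
--     """ takes list of credit card digits and returns list of digits to be
--     doubled """
--     doub = []
--
--     start = len(lst) - 2
--     if start % 2 == 1:
--         end = 0
--     else:
--         end = -1
--     for i in range(start, end, -2):
--         doub.append(int(lst[i]))
--     return doub
-- ===== SOURCE B (Python) =====
-- def double_dig(lst):
--     """ takes list of credit card digits and returns list of digits to be
--     doubled """
--     return [int(d) for i, d in enumerate(reversed(lst)) if i % 2 == 1]
-- ===== Notes on version B (the rewrite author's own statement) =====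
-- stated objective: idiomatic
-- what changed: Replaces the hand-computed start/end bounds and the backward step-2 index range with a filtered comprehension over enumerate(reversed(lst)) that keeps the digits at odd reversed positions.
import Mathlib
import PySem

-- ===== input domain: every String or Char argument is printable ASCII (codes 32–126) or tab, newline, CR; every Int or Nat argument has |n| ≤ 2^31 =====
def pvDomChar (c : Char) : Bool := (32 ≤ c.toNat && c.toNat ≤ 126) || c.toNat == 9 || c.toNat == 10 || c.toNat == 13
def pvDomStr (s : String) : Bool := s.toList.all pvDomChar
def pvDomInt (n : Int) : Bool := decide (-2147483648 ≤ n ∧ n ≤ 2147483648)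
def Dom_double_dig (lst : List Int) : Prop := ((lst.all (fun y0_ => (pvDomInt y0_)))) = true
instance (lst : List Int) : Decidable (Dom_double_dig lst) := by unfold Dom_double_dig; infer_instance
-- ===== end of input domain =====

-- B replaces A's hand-computed bounds and backward step-2 index range with a filtered
-- comprehension over enumerate(reversed(lst)) (idiomatic; same output, same cost).


-- ===== PORT A =====
def double_dig (lst : List Int) : List Int :=
  let start : Int := (lst.length : Int) - 2
  let stop : Int := if PySem.Int.mod start 2 = 1 then 0 else -1
  (PySem.List.pyRange start stop (-2)).foldl (fun doub i => doub ++ [PySem.List.pyGetD lst i 0]) []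

-- ===== PORT B =====
def double_dig_alt (lst : List Int) : List Int :=
  ((PySem.List.enumerate lst.reverse 0).filter (fun p => PySem.Int.mod p.1 2 == 1)).map (fun p => p.2)

-- ===== PRECONDITION & SPEC =====
def Spec_double_dig (lst : List Int) (out : List Int) : Prop := out = double_dig_alt lst
instance (lst : List Int) (out : List Int) : Decidable (Spec_double_dig lst out) := by unfold Spec_double_dig; infer_instance

-- ===== CLAIM (what is proved, stated in full; the proofs are below) =====
def Claim_equal_double_dig : Prop := ∀ (lst : List Int), Dom_double_dig lst → Spec_double_dig lst (double_dig lst)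

-- ===== LEMMAS AND PROOFS =====

-- Common closed form: the k-th doubled digit is lst[n-2-2k], for k < n/2.
def pvCanon (lst : List Int) : List Int :=
  (List.range (lst.length / 2)).map (fun k => lst.getD (lst.length - 2 - 2*k) 0)

lemma filter_range_odd (n : Nat) :
    (List.range n).filter (fun k => k % 2 == 1) = (List.range (n / 2)).map (fun k => 2*k+1) := by
  induction n with
  | zero => simp
  | succ n ih =>
    rw [List.range_succ, List.filter_append, ih]
    rcases Nat.mod_two_eq_zero_or_one n with h | h
    · have : (n + 1) / 2 = n / 2 := by omega
      simp [this, h]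
    · have h2 : (n + 1) / 2 = n / 2 + 1 := by omega
      have h3 : 2 * (n / 2) + 1 = n := by omega
      simp [h2, List.range_succ, h, h3]

lemma A_eq_canon (lst : List Int) : double_dig lst = pvCanon lst := by
  unfold double_dig pvCanon
  rw [PySem.List.foldl_append_singleton_eq_map]
  unfold PySem.List.pyRange
  simp only [show ¬((-2:Int) = 0) by decide, if_false, show ¬((0:Int) < -2) by decide]
  set n := lst.length with hn
  have hm : PySem.Int.mod ((n:Int) - 2) 2 = ((n:Int) - 2) % 2 := PySem.Int.mod_eq_emod_of_pos (by norm_num)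
  rcases Nat.mod_two_eq_zero_or_one n with h | h
  · -- n even: mod = 0, stop = -1
    have hmod : PySem.Int.mod ((n:Int) - 2) 2 = 0 := by rw [hm]; omega
    rw [hmod]
    simp only [show ¬((0:Int) = 1) by decide, if_false]
    have hc : (if (-1:Int) < (n:Int) - 2 then (((n:Int) - 2 - (-1) + - -2 - 1) / -(-2)).toNat else 0) = n / 2 := by
      split_ifs with hlt <;> (try norm_num) <;> omega
    rw [hc, List.map_map]
    refine List.map_congr_left ?_
    intro k hk
    rw [List.mem_range] at hk
    have h0 : (0:Int) ≤ (n:Int) - 2 + -2 * (k:Int) := by omega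
    simp only [Function.comp]
    rw [PySem.List.pyGetD_of_nonneg _ _ h0]
    congr 1
    omega
  · -- n odd: mod = 1, stop = 0
    have hmod : PySem.Int.mod ((n:Int) - 2) 2 = 1 := by rw [hm]; omega
    rw [hmod]
    simp only [if_true]
    have hc : (if (0:Int) < (n:Int) - 2 then (((n:Int) - 2 - 0 + - -2 - 1) / -(-2)).toNat else 0) = n / 2 := by
      split_ifs with hlt <;> (try norm_num) <;> omega
    rw [hc, List.map_map]
    refine List.map_congr_left ?_
    intro k hk
    rw [List.mem_range] at hk
    have h0 : (0:Int) ≤ (n:Int) - 2 + -2 * (k:Int) := by omega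
    simp only [Function.comp]
    rw [PySem.List.pyGetD_of_nonneg _ _ h0]
    congr 1
    omega

lemma B_eq_canon (lst : List Int) : double_dig_alt lst = pvCanon lst := by
  unfold double_dig_alt pvCanon
  rw [PySem.List.enumerate_eq_map_pyRange lst.reverse 0]
  have hlen : PySem.List.len lst.reverse = (lst.length : Int) := by
    simp [PySem.List.len_eq]
  rw [hlen, PySem.List.pyRange_zero_nat, List.filter_map, List.map_map, List.filter_map, List.map_map]
  simp only [Function.comp_def]
  have hpred : ∀ k ∈ List.range lst.length,
      (PySem.Int.mod ((k:Nat) : Int) 2 == 1) = (k % 2 == 1) := by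
    intro k _
    rw [show PySem.Int.mod (k:Int) 2 = ((k % 2 : Nat) : Int) from PySem.Int.mod_natCast k 2]
    rcases Nat.mod_two_eq_zero_or_one k with h | h <;> simp [h]
  rw [List.filter_congr hpred, filter_range_odd, List.map_map]
  refine List.map_congr_left ?_
  intro k hk
  rw [List.mem_range] at hk
  simp only [Function.comp]
  have h1 : 2*k+1 < lst.length := by omega
  rw [PySem.List.pyGetD_of_nonneg _ _ (by positivity)]
  rw [show ((2*k+1 : Nat) : Int).toNat = 2*k+1 by omega]
  rw [List.getD_eq_getElem _ _ (by simpa using h1), List.getD_eq_getElem _ _ (by omega),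
    List.getElem_reverse]
  congr 1
  omega

-- ===== VERDICT (by name: the statement is the Claim_ definition above) =====
theorem double_dig_spec : Claim_equal_double_dig := by
  intro lst _
  unfold Spec_double_dig
  rw [A_eq_canon, B_eq_canon]
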